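-- pv_equiv track=rewrite | github.com/VedranCutic/Advent-of-Code | 2025/day07/solution_recursive.py | beam_timelines
-- ===== SOURCE A (Python) =====
-- MEMO = {}
--
-- def beam_timelines(beam, manifold):
--     if not manifold:
--         return 1
--
--     if (beam, tuple(manifold)) in MEMO:
--         return MEMO[beam, tuple(manifold)]
--
--     for i, location in enumerate(manifold[0]):
--         if location == "^" and beam == i:
--             left = beam_timelines(beam - 1, manifold[1:])
--             right = beam_timelines(beam + 1, manifold[1:])
--             result = left + right
--             break
--     else:
--         result = beam_timelines(beam, manifold[1:])
--
--     MEMO[beam, tuple(manifold)] = result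
--     return result
-- ===== SOURCE B (Python) =====
-- def beam_timelines(beam, manifold):
--     counts = {beam: 1}
--     for row in manifold:
--         new = {}
--         for b, c in counts.items():
--             if 0 <= b < len(row) and row[b] == "^":
--                 new[b - 1] = new.get(b - 1, 0) + c
--                 new[b + 1] = new.get(b + 1, 0) + c
--             else:
--                 new[b] = new.get(b, 0) + c
--         counts = new
--     return sum(counts.values())
-- ===== Notes on version B (the rewrite author's own statement) =====
-- stated objective: faster
-- what changed: Replaces memoized top-down recursion (keyed by suffix tuples, with a per-row character scan) by a single forward pass maintaining a dict of beam-position counts, splitting counts at '^' via an O(1) indexed check.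
import Mathlib
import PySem

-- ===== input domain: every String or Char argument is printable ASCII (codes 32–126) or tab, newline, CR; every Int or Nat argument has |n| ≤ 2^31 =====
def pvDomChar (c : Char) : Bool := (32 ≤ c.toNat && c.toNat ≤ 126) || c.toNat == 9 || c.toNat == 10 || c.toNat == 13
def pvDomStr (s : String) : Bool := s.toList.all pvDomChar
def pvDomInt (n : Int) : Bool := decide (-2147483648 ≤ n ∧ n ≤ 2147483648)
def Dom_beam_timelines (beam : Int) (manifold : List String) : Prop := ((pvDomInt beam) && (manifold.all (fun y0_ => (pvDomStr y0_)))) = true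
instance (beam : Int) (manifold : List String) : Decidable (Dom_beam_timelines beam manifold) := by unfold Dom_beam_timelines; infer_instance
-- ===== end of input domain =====

-- B replaces A's memoized top-down recursion by a single forward pass with a dict of
-- beam-position counts (objective: faster; A's global MEMO is a pure cache that never changes
-- A's return value, so it is omitted from the port).

-- ===== PORT A =====
-- the 'for i, location in enumerate(manifold[0]): if location == "^" and beam == i: … break / else' scan
def pvScanA (beam : Int) (cs : List Char) (i : Int) : Bool :=
  match cs with
  | [] => false
  | c :: rest => if c == '^' && beam == i then true else pvScanA beam rest (i + 1)

def beam_timelines (beam : Int) (manifold : List String) : Int :=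
  match manifold with
  | [] => 1
  | row :: rest =>
    if pvScanA beam row.toList 0 then
      -- left = …(beam-1, manifold[1:]); right = …(beam+1, manifold[1:]); result = left + right
      beam_timelines (beam - 1) rest + beam_timelines (beam + 1) rest
    else
      beam_timelines beam rest

-- ===== PORT B =====
-- new[k] = new.get(k, 0) + c
def pvAddTo (d : PySem.Dict Int Int) (k c : Int) : PySem.Dict Int Int :=
  d.insert k (d.getD k 0 + c)

-- 0 <= b < len(row) and row[b] == "^"   (row[b] never raises here: it is guarded; exact via pyGet?)
def pvSplitB (b : Int) (cs : List Char) : Bool :=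
  decide (0 ≤ b) && decide (b < (cs.length : Int)) && (PySem.List.pyGet? cs b == some '^')

-- the inner 'for b, c in counts.items()' loop building 'new'
def pvStepRow (d : PySem.Dict Int Int) (row : String) : PySem.Dict Int Int :=
  d.items.foldl
    (fun nd p =>
      if pvSplitB p.1 row.toList then pvAddTo (pvAddTo nd (p.1 - 1) p.2) (p.1 + 1) p.2
      else pvAddTo nd p.1 p.2)
    PySem.Dict.empty

def beam_timelines_alt (beam : Int) (manifold : List String) : Int :=
  ((manifold.foldl pvStepRow ((PySem.Dict.empty : PySem.Dict Int Int).insert beam 1)).values).sum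

-- ===== PRECONDITION & SPEC =====
def Spec_beam_timelines (beam : Int) (manifold : List String) (out : Int) : Prop := out = beam_timelines_alt beam manifold
instance (beam : Int) (manifold : List String) (out : Int) : Decidable (Spec_beam_timelines beam manifold out) := by unfold Spec_beam_timelines; infer_instance

-- ===== CLAIM (what is proved, stated in full; the proofs are below) =====
def Claim_equal_beam_timelines : Prop := ∀ (beam : Int) (manifold : List String), Dom_beam_timelines beam manifold → Spec_beam_timelines beam manifold (beam_timelines beam manifold)

-- ===== LEMMAS AND PROOFS =====

-- weighted sum of a dict's entries
def pvWsum (d : PySem.Dict Int Int) (g : Int → Int) : Int :=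
  (d.items.map (fun p => p.2 * g p.1)).sum

-- pvSplitB is false for a negative index
theorem pvSplitB_neg (x : Int) (l : List Char) (h : x < 0) : pvSplitB x l = false := by
  have h0 : decide (0 ≤ x) = false := decide_eq_false (by omega)
  simp [pvSplitB, h0]

-- A's scan finds '^' at index beam iff B's indexed check fires (shifted by the start index i)
theorem pvScanA_eq (cs : List Char) (b : Int) : ∀ (i : Int),
    pvScanA b cs i = pvSplitB (b - i) cs := by
  induction cs with
  | nil =>
    intro i
    have h0 : (decide (0 ≤ b - i) && decide (b - i < ((List.length ([] : List Char) : Nat) : Int))) = false := by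
      by_cases h : 0 ≤ b - i
      · have hlt : decide (b - i < ((List.length ([] : List Char) : Nat) : Int)) = false :=
          decide_eq_false (by simp; omega)
        rw [hlt, Bool.and_false]
      · rw [decide_eq_false h, Bool.false_and]
    simp only [pvScanA, pvSplitB]
    rw [h0, Bool.false_and]
  | cons c rest ih =>
    intro i
    by_cases hb : b = i
    · subst hb
      have hneg : pvSplitB (b - (b + 1)) rest = false := pvSplitB_neg _ _ (by omega)
      have hz : b - b = (0 : Int) := by omega
      simp only [pvScanA, ih, hneg, hz]
      by_cases hc : c = '^'
      · simp [pvSplitB, hc, PySem.List.pyGet?_zero_cons]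
      · simp [pvSplitB, hc, PySem.List.pyGet?_zero_cons]
    · have h1 : pvScanA b (c :: rest) i = pvScanA b rest (i + 1) := by
        simp [pvScanA, hb]
      rw [h1, ih]
      by_cases hpos : 1 ≤ b - i
      · have hb1 : b - (i + 1) = (((b - i - 1).toNat : Nat) : Int) := by omega
        have hb2 : b - i = (((b - i - 1).toNat : Nat) : Int) + 1 := by omega
        rw [hb1, hb2]
        have d1 : decide (0 ≤ (((b - i - 1).toNat : Nat) : Int)) = true := by simp
        have d2 : decide (0 ≤ (((b - i - 1).toNat : Nat) : Int) + 1) = true := by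
          apply decide_eq_true; positivity
        have d3 : decide ((((b - i - 1).toNat : Nat) : Int) + 1 < ((List.length (c :: rest) : Nat) : Int))
            = decide ((((b - i - 1).toNat : Nat) : Int) < ((rest.length : Nat) : Int)) := by
          simp only [decide_eq_decide, List.length_cons]
          push_cast
          omega
        simp only [pvSplitB, PySem.List.pyGet?_cons_succ, d1, d2, d3, Bool.true_and]
        have e : ((((b - i - 1).toNat : Int) + 1 - 1).toNat : Int) = (((b - i - 1).toNat : Nat) : Int) := by omega
        rw [e, d1, Bool.true_and]
      · have hA : pvSplitB (b - (i + 1)) rest = false := pvSplitB_neg _ _ (by omega)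
        have hB : pvSplitB (b - i) (c :: rest) = false := pvSplitB_neg _ _ (by omega)
        rw [hA, hB]

-- A unfolds on a cons row via B's check
theorem beam_timelines_cons (b : Int) (row : String) (rest : List String) :
    beam_timelines b (row :: rest) =
      if pvSplitB b row.toList then
        beam_timelines (b - 1) rest + beam_timelines (b + 1) rest
      else beam_timelines b rest := by
  have h := pvScanA_eq row.toList b 0
  simp only [beam_timelines]
  rw [h]
  norm_num

-- replacing (the unique) entry with key k in a key-nodup pair list shifts the weighted sum
theorem pvMapReplaceSum (g : Int → Int) (k old v' : Int) :
    ∀ (l : List (Int × Int)), (l.map Prod.fst).Nodup → (k, old) ∈ l →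
    ((l.map (fun p => if p.1 == k then (k, v') else p)).map (fun p => p.2 * g p.1)).sum
      = (l.map (fun p => p.2 * g p.1)).sum - old * g k + v' * g k := by
  intro l
  induction l with
  | nil => intro _ h; simp at h
  | cons a t ih =>
    intro hn hm
    rw [List.map_cons, List.nodup_cons] at hn
    by_cases hak : a.1 = k
    · have hknot : ∀ p ∈ t, p.1 ≠ k := by
        intro p hp hpk
        have hk : k ∈ t.map Prod.fst := hpk ▸ List.mem_map.mpr ⟨p, hp, rfl⟩
        exact hn.1 (hak ▸ hk)
      have ha2 : a = (k, old) := by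
        rcases List.mem_cons.mp hm with h | h
        · exact h.symm
        · exact absurd rfl (hknot _ h)
      have hid : t.map (fun p => if p.1 == k then (k, v') else p) = t := by
        have h' : t.map (fun p => if p.1 == k then (k, v') else p) = t.map id := by
          apply List.map_congr_left; intro p hp; simp [hknot p hp]
        rw [h', List.map_id]
      subst ha2
      have hc1 : (((k, old).1 == k)) = true := by simp
      rw [List.map_cons, if_pos hc1, hid, List.map_cons, List.sum_cons, List.map_cons, List.sum_cons]
      ring
    · have hne : (a.1 == k) = false := by simp [hak]
      have hm' : (k, old) ∈ t := by
        rcases List.mem_cons.mp hm with h | h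
        · subst h; exact absurd rfl hak
        · exact h
      simp only [List.map_cons, hne, Bool.false_eq_true, if_false, List.sum_cons]
      rw [ih hn.2 hm']
      ring

-- new[k] = new.get(k,0) + c adds c * g k to the weighted sum
theorem pvWsum_addTo (d : PySem.Dict Int Int) (hnd : d.keys.Nodup) (k c : Int) (g : Int → Int) :
    pvWsum (pvAddTo d k c) g = pvWsum d g + c * g k := by
  unfold pvAddTo pvWsum
  by_cases hc : d.contains k = true
  · obtain ⟨old, hold⟩ : ∃ old, d.get? k = some old := by
      rcases h : d.get? k with _ | old
      · rw [PySem.Dict.contains_eq_isSome_get?, h] at hc; simp at hc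
      · exact ⟨old, rfl⟩
    have hgetD : d.getD k 0 = old := PySem.Dict.getD_of_get?_eq_some d 0 hold
    rw [PySem.Dict.items_insert_of_contains d _ hc, hgetD]
    have hmem : (k, old) ∈ d.items := PySem.Dict.mem_items_of_get?_eq_some d hold
    have hrepl := pvMapReplaceSum g k old (old + c) d.items hnd hmem
    rw [hrepl]; ring
  · have hc' : d.contains k = false := by simpa using hc
    rw [PySem.Dict.items_insert_of_not_contains d _ hc',
        PySem.Dict.getD_of_not_contains d 0 hc']
    simp only [List.map_append, List.map_cons, List.map_nil, List.sum_append, List.sum_cons,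
      List.sum_nil]
    ring

theorem pvNodup_addTo (d : PySem.Dict Int Int) (hnd : d.keys.Nodup) (k c : Int) :
    (pvAddTo d k c).keys.Nodup := PySem.Dict.nodup_keys_insert d k (d.getD k 0 + c) hnd

-- the inner items loop: weighted sum of the built dict, plus key uniqueness
theorem pvStepFold (row : List Char) (g : Int → Int) :
    ∀ (items : List (Int × Int)) (nd : PySem.Dict Int Int), nd.keys.Nodup →
    (pvWsum (items.foldl
      (fun nd p =>
        if pvSplitB p.1 row then pvAddTo (pvAddTo nd (p.1 - 1) p.2) (p.1 + 1) p.2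
        else pvAddTo nd p.1 p.2) nd) g
      = pvWsum nd g +
        (items.map (fun p => p.2 * (if pvSplitB p.1 row then g (p.1 - 1) + g (p.1 + 1) else g p.1))).sum)
    ∧ ((items.foldl
      (fun nd p =>
        if pvSplitB p.1 row then pvAddTo (pvAddTo nd (p.1 - 1) p.2) (p.1 + 1) p.2
        else pvAddTo nd p.1 p.2) nd).keys.Nodup) := by
  intro items
  induction items with
  | nil => intro nd hnd; simpa using hnd
  | cons p t ih =>
    intro nd hnd
    by_cases hs : pvSplitB p.1 row = true
    · have hnd1 := pvNodup_addTo nd hnd (p.1 - 1) p.2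
      have hnd2 := pvNodup_addTo _ hnd1 (p.1 + 1) p.2
      have h := ih (pvAddTo (pvAddTo nd (p.1 - 1) p.2) (p.1 + 1) p.2) hnd2
      constructor
      · simp only [List.foldl_cons, hs, if_pos]
        rw [h.1, pvWsum_addTo _ hnd1, pvWsum_addTo _ hnd]
        simp only [List.map_cons, List.sum_cons, hs, if_pos]
        ring
      · simp only [List.foldl_cons, hs, if_pos]; exact h.2
    · have hs' : pvSplitB p.1 row = false := by simpa using hs
      have hnd1 := pvNodup_addTo nd hnd p.1 p.2
      have h := ih (pvAddTo nd p.1 p.2) hnd1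
      constructor
      · simp only [List.foldl_cons, hs', Bool.false_eq_true, if_false]
        rw [h.1, pvWsum_addTo _ hnd]
        simp only [List.map_cons, List.sum_cons, hs', Bool.false_eq_true, if_false]
        ring
      · simp only [List.foldl_cons, hs', Bool.false_eq_true, if_false]; exact h.2

-- the outer loop: sum of final values = weighted sum of the start dict under A's function
theorem pvMainLoop :
    ∀ (rows : List String) (d : PySem.Dict Int Int), d.keys.Nodup →
    ((rows.foldl pvStepRow d).values).sum = pvWsum d (fun b => beam_timelines b rows) := by
  intro rows
  induction rows with
  | nil =>
    intro d hnd
    have h1 : ∀ b : Int, beam_timelines b ([] : List String) = 1 := fun _ => rfl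
    simp only [List.foldl_nil, h1, pvWsum, mul_one, PySem.Dict.values]
  | cons row rest ih =>
    intro d hnd
    have hstep := pvStepFold row.toList (fun b => beam_timelines b rest) d.items PySem.Dict.empty
      PySem.Dict.nodup_keys_empty
    have hnd' : (pvStepRow d row).keys.Nodup := hstep.2
    simp only [List.foldl_cons]
    rw [ih (pvStepRow d row) hnd']
    show pvWsum (pvStepRow d row) _ = _
    unfold pvStepRow
    rw [hstep.1]
    have hempty : pvWsum PySem.Dict.empty (fun b => beam_timelines b rest) = 0 := by
      unfold pvWsum
      simp [PySem.Dict.empty]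
    rw [hempty, zero_add]
    unfold pvWsum
    refine congrArg List.sum (List.map_congr_left fun p _ => ?_)
    show p.2 * (if pvSplitB p.1 row.toList = true then
          beam_timelines (p.1 - 1) rest + beam_timelines (p.1 + 1) rest
        else beam_timelines p.1 rest)
      = p.2 * beam_timelines p.1 (row :: rest)
    rw [beam_timelines_cons]

-- ===== VERDICT (by name: the statement is the Claim_ definition above) =====
theorem beam_timelines_spec : Claim_equal_beam_timelines := by
  intro beam manifold _
  show beam_timelines beam manifold = beam_timelines_alt beam manifold
  unfold beam_timelines_alt
  rw [pvMainLoop manifold _ (PySem.Dict.nodup_keys_insert _ _ _ PySem.Dict.nodup_keys_empty)]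
  unfold pvWsum
  rw [PySem.Dict.items_insert_of_not_contains _ _ (PySem.Dict.contains_empty beam)]
  simp [PySem.Dict.empty]
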